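-- pv_equiv track=rewrite | github.com/Mufabo/exams2anki | exams2anki/main.py | separateQandA
-- ===== SOURCE A (Python) =====
-- def separateQandA(QandA):
--     frontOrBack = "front"
--     front = ""
--     back = ""
--     for elem in QandA:
--         if "View Answer" in elem:
--             frontOrBack = "back"
--         else:
--             if frontOrBack == "front":
--                 front += elem
--             else:
--                 back += elem
--     return front, back
-- ===== SOURCE B (Python) =====
-- def separateQandA(QandA):
--     idx = next((i for i, e in enumerate(QandA) if "View Answer" in e), None)
--     if idx is None:
--         return "".join(QandA), ""
--     front = "".join(QandA[:idx])
--     back = "".join(e for e in QandA[idx + 1:] if "View Answer" not in e)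
--     return front, back
-- ===== Notes on version B (the rewrite author's own statement) =====
-- stated objective: idiomatic
-- what changed: Replaces the single toggled-accumulator loop by an index-then-split structure: find the first marker index, join the prefix as the front, and join the filtered suffix as the back.
import Mathlib
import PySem

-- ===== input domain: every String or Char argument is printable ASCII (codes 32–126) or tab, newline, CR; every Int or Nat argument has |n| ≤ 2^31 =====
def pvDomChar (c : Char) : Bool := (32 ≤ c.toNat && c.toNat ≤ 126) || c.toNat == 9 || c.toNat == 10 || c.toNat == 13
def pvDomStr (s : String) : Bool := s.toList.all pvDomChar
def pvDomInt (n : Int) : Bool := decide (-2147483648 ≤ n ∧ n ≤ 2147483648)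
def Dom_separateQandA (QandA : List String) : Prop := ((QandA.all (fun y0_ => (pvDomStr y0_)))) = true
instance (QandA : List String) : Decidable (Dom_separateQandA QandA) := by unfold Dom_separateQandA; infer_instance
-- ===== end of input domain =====

-- B replaces A's toggled-accumulator loop by an index-then-split structure (find first
-- marker index, join the prefix, join the filtered suffix); objective: idiomatic.


-- ===== PORT A =====
-- state = (frontOrBack, front, back), exactly A's loop
def separateQandA (QandA : List String) : String × String :=
  let r := QandA.foldl
    (fun (st : String × String × String) elem =>
      if PySem.Str.isIn "View Answer" elem then ("back", st.2.1, st.2.2)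
      else if st.1 == "front" then (st.1, st.2.1 ++ elem, st.2.2)
      else (st.1, st.2.1, st.2.2 ++ elem))
    ("front", "", "")
  (r.2.1, r.2.2)

-- ===== PORT B =====
def separateQandA_alt (QandA : List String) : String × String :=
  match QandA.findIdx? (fun e => PySem.Str.isIn "View Answer" e) with
  | none => (String.join QandA, "")
  | some i =>
      (String.join (QandA.take i),
       String.join ((QandA.drop (i + 1)).filter (fun e => !PySem.Str.isIn "View Answer" e)))

-- ===== PRECONDITION & SPEC =====
def Spec_separateQandA (QandA : List String) (out : String × String) : Prop := out = separateQandA_alt QandA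
instance (QandA : List String) (out : String × String) : Decidable (Spec_separateQandA QandA out) := by unfold Spec_separateQandA; infer_instance

-- ===== CLAIM (what is proved, stated in full; the proofs are below) =====
def Claim_equal_separateQandA : Prop := ∀ (QandA : List String), Dom_separateQandA QandA → Spec_separateQandA QandA (separateQandA QandA)

-- ===== LEMMAS AND PROOFS =====

-- A's loop body, named for the lemmas
def pvStep (st : String × String × String) (elem : String) : String × String × String :=
  if PySem.Str.isIn "View Answer" elem then ("back", st.2.1, st.2.2)
  else if st.1 == "front" then (st.1, st.2.1 ++ elem, st.2.2)
  else (st.1, st.2.1, st.2.2 ++ elem)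

theorem pvJoinAux (l : List String) (s : String) :
    l.foldl (fun r t => r ++ t) s = s ++ String.join l := by
  induction l generalizing s with
  | nil => simp [String.join]
  | cons h t ih =>
      rw [List.foldl_cons, ih]
      show _ = s ++ List.foldl (fun r t => r ++ t) ("" ++ h) t
      rw [ih, String.empty_append, String.append_assoc]

theorem pvJoinCons (h : String) (t : List String) :
    String.join (h :: t) = h ++ String.join t := by
  show List.foldl (fun r s => r ++ s) ("" ++ h) t = _
  rw [pvJoinAux, String.empty_append]

-- once in "back" mode, the loop appends exactly the non-marker elements to back
theorem pvFoldBack (l : List String) (f b : String) :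
    l.foldl pvStep ("back", f, b) =
      ("back", f, b ++ String.join (l.filter (fun e => !PySem.Str.isIn "View Answer" e))) := by
  induction l generalizing b with
  | nil => simp [String.join]
  | cons h t ih =>
      simp only [List.foldl_cons, pvStep]
      by_cases hp : PySem.Str.isIn "View Answer" h
      · rw [if_pos hp, ih]
        simp only [List.filter_cons, hp, Bool.not_true, Bool.false_eq_true, if_false]
      · have hb : PySem.Str.isIn "View Answer" h = false := by
          exact Bool.not_eq_true _ ▸ hp
        rw [if_neg hp, if_neg (by decide), ih]
        simp only [List.filter_cons, hb, Bool.not_false, if_true]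
        rw [pvJoinCons, String.append_assoc]

-- the loop from "front" mode, characterised by the first marker index
theorem pvFoldFront (l : List String) (f : String) :
    l.foldl pvStep ("front", f, "") =
      match l.findIdx? (fun e => PySem.Str.isIn "View Answer" e) with
      | none => ("front", f ++ String.join l, "")
      | some i => ("back", f ++ String.join (l.take i),
          String.join ((l.drop (i + 1)).filter (fun e => !PySem.Str.isIn "View Answer" e))) := by
  induction l generalizing f with
  | nil => simp [String.join]
  | cons h t ih =>
      simp only [List.foldl_cons, pvStep, List.findIdx?_cons]
      by_cases hp : PySem.Str.isIn "View Answer" h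
      · rw [if_pos hp, pvFoldBack, if_pos hp]
        simp [String.join]
      · rw [if_neg hp, if_pos (show ("front" == "front") = true from rfl), ih, if_neg hp]
        cases hfi : t.findIdx? (fun e => PySem.Str.isIn "View Answer" e) with
        | none =>
            simp only [Option.map_none]
            rw [pvJoinCons, String.append_assoc]
        | some j =>
            simp only [Option.map_some]
            rw [List.take_succ_cons, List.drop_succ_cons, pvJoinCons, String.append_assoc]

-- ===== VERDICT (by name: the statement is the Claim_ definition above) =====
theorem separateQandA_spec : Claim_equal_separateQandA := by
  intro QandA _
  show _ = _
  unfold separateQandA separateQandA_alt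
  show (let r := QandA.foldl pvStep ("front", "", ""); (r.2.1, r.2.2)) = _
  rw [pvFoldFront]
  cases hfi : QandA.findIdx? (fun e => PySem.Str.isIn "View Answer" e) <;> simp
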